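-- pv_equiv track=rewrite | github.com/SchriderLab/Timesweeper | onePop/runAndParseSlim.py | removeMonomorphic
-- ===== SOURCE A (Python) =====
-- def getFreq(mut, genomes):
--     locI, loc, mutId = mut
--     mutCount = 0
--     for genome in genomes:
--         if mutId in genome:
--             mutCount += 1
--     return mutCount
--
-- def removeMonomorphic(allMuts, genomes):
--     newMuts = []
--     newLocI = 0
--     for locI, loc, contLoc, mutId in allMuts:
--         freq = getFreq((locI, loc, mutId), genomes)
--         if freq > 0 and freq < len(genomes):
--             newMuts.append((newLocI, loc, contLoc, mutId))
--             newLocI += 1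
--     return newMuts
-- ===== SOURCE B (Python) =====
-- def removeMonomorphic(allMuts, genomes):
--     counts = {}
--     for genome in genomes:
--         for m in set(genome):
--             counts[m] = counts.get(m, 0) + 1
--     nGenomes = len(genomes)
--     kept = [m for m in allMuts if 0 < counts.get(m[3], 0) < nGenomes]
--     return [(i, loc, contLoc, mutId)
--             for i, (_, loc, contLoc, mutId) in enumerate(kept)]
-- ===== Notes on version B (the rewrite author's own statement) =====
-- stated objective: faster
-- what changed: B precomputes a mutId->genome-count dictionary in one pass over the genomes (deduplicating each genome with a set), then filters allMuts with O(1) lookups and renumbers via enumerate, instead of A's per-mutation scan over all genomes with an 'in'-list test.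
import Mathlib
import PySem

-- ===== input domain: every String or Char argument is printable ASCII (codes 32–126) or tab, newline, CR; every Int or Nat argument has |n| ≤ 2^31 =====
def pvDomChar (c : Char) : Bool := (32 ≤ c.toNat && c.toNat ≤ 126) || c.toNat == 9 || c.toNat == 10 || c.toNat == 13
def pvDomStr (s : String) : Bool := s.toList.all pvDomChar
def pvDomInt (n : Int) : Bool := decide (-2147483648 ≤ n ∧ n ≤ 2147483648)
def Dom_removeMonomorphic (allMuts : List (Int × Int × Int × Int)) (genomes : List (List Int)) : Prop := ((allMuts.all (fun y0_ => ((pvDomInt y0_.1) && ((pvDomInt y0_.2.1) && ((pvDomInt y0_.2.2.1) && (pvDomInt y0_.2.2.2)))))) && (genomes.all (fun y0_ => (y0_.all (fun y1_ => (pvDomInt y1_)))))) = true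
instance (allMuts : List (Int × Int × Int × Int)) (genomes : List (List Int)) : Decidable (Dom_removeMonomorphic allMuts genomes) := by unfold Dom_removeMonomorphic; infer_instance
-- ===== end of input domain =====

-- B replaces A's per-mutation scan over all genomes by a precomputed mutId→count dictionary (one pass over genomes, deduplicated per genome) plus enumerate-renumbering: asymptotically faster.


-- ===== PORT A =====
def getFreq (m0 : Int × Int × Int) (genomes : List (List Int)) : Int :=
  genomes.foldl (fun mutCount genome =>
    if m0.2.2 ∈ genome then mutCount + 1 else mutCount) 0

def removeMonomorphic (allMuts : List (Int × Int × Int × Int)) (genomes : List (List Int)) : List (Int × Int × Int × Int) :=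
  (allMuts.foldl (fun (st : List (Int × Int × Int × Int) × Int) t =>
    let freq := getFreq (t.1, t.2.1, t.2.2.2) genomes
    if 0 < freq ∧ freq < (genomes.length : Int) then
      (st.1 ++ [(st.2, t.2.1, t.2.2.1, t.2.2.2)], st.2 + 1)
    else st) ([], 0)).1

-- ===== PORT B =====
def removeMonomorphic_alt (allMuts : List (Int × Int × Int × Int)) (genomes : List (List Int)) : List (Int × Int × Int × Int) :=
  let counts : PySem.Dict Int Int :=
    genomes.foldl (fun d genome =>
      (PySem.Set.ofList genome).foldl (fun d m => d.modify m 0 (· + 1)) d)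
      PySem.Dict.empty
  let nGenomes : Int := genomes.length
  let kept := allMuts.filter (fun m =>
    decide (0 < counts.getD m.2.2.2 0) && decide (counts.getD m.2.2.2 0 < nGenomes))
  (PySem.List.enumerate kept 0).map (fun p => (p.1, p.2.2.1, p.2.2.2.1, p.2.2.2.2))

-- ===== PRECONDITION & SPEC =====
def Spec_removeMonomorphic (allMuts : List (Int × Int × Int × Int)) (genomes : List (List Int)) (out : List (Int × Int × Int × Int)) : Prop := out = removeMonomorphic_alt allMuts genomes
instance (allMuts : List (Int × Int × Int × Int)) (genomes : List (List Int)) (out : List (Int × Int × Int × Int)) : Decidable (Spec_removeMonomorphic allMuts genomes out) := by unfold Spec_removeMonomorphic; infer_instance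

-- ===== CLAIM (what is proved, stated in full; the proofs are below) =====
def Claim_equal_removeMonomorphic : Prop := ∀ (allMuts : List (Int × Int × Int × Int)) (genomes : List (List Int)), Dom_removeMonomorphic allMuts genomes → Spec_removeMonomorphic allMuts genomes (removeMonomorphic allMuts genomes)

-- ===== LEMMAS AND PROOFS =====

-- A's genome-scanning loop counts the genomes containing the mutation id
theorem foldl_count_mem (x : Int) (gs : List (List Int)) (a : Int) :
    gs.foldl (fun c g => if x ∈ g then c + 1 else c) a
      = a + (gs.countP (fun g => decide (x ∈ g)) : Int) := by
  induction gs generalizing a with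
  | nil => simp
  | cons g gs ih =>
    rw [List.foldl_cons, ih, List.countP_cons]
    by_cases h : x ∈ g <;> simp [h]
    ring

theorem getFreq_eq_countP (m0 : Int × Int × Int) (genomes : List (List Int)) :
    getFreq m0 genomes = (genomes.countP (fun g => decide (m0.2.2 ∈ g)) : Int) := by
  unfold getFreq
  rw [foldl_count_mem]
  simp

-- B's counter dictionary counts, for each mutId, the number of genomes containing it
theorem counts_getD (gs : List (List Int)) (d : PySem.Dict Int Int) (v : Int) :
    ((gs.foldl (fun d genome =>
        (PySem.Set.ofList genome).foldl (fun d m => d.modify m 0 (· + 1)) d) d).getD v 0)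
      = d.getD v 0 + (gs.countP (fun g => decide (v ∈ g)) : Int) := by
  induction gs generalizing d with
  | nil => simp
  | cons g gs ih =>
    rw [List.foldl_cons, ih, PySem.Dict.getD_foldl_modify_add_one, List.countP_cons]
    by_cases h : v ∈ g
    · simp [h]
      ring
    · simp [List.count_eq_zero_of_not_mem (fun hm => h ((PySem.Set.mem_ofList g v).1 hm)), h]

-- the A-side fold with an index accumulator is enumerate of the filtered list
theorem fold_eq_enumerate (q : (Int × Int × Int × Int) → Prop) [DecidablePred q]
    (l : List (Int × Int × Int × Int)) (acc : List (Int × Int × Int × Int)) (i : Int) :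
    (l.foldl (fun (st : List (Int × Int × Int × Int) × Int) t =>
        if q t then (st.1 ++ [(st.2, t.2.1, t.2.2.1, t.2.2.2)], st.2 + 1) else st) (acc, i)).1
      = acc ++ (PySem.List.enumerate (l.filter (fun t => decide (q t))) i).map
          (fun p => (p.1, p.2.2.1, p.2.2.2.1, p.2.2.2.2)) := by
  induction l generalizing acc i with
  | nil => simp
  | cons t ts ih =>
    by_cases h : q t
    · simp [h, ih, PySem.List.enumerate_cons]
    · simp [h, ih]

-- ===== VERDICT (by name: the statement is the Claim_ definition above) =====
theorem removeMonomorphic_spec : Claim_equal_removeMonomorphic := by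
  intro allMuts genomes _
  show removeMonomorphic allMuts genomes = removeMonomorphic_alt allMuts genomes
  unfold removeMonomorphic removeMonomorphic_alt
  rw [fold_eq_enumerate (fun t =>
        0 < getFreq (t.1, t.2.1, t.2.2.2) genomes ∧
        getFreq (t.1, t.2.1, t.2.2.2) genomes < (genomes.length : Int))]
  simp only [List.nil_append]
  have hf : allMuts.filter (fun t => decide
        (0 < getFreq (t.1, t.2.1, t.2.2.2) genomes ∧
         getFreq (t.1, t.2.1, t.2.2.2) genomes < (genomes.length : Int)))
      = allMuts.filter (fun m =>
          decide (0 < (genomes.foldl (fun d genome =>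
              (PySem.Set.ofList genome).foldl (fun d m => d.modify m 0 (· + 1)) d)
              PySem.Dict.empty : PySem.Dict Int Int).getD m.2.2.2 0) &&
          decide ((genomes.foldl (fun d genome =>
              (PySem.Set.ofList genome).foldl (fun d m => d.modify m 0 (· + 1)) d)
              PySem.Dict.empty : PySem.Dict Int Int).getD m.2.2.2 0 < (genomes.length : Int))) := by
    apply List.filter_congr
    intro t _
    rw [counts_getD, getFreq_eq_countP]
    simp
  rw [hf]
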